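-- pv_equiv track=rewrite | github.com/fourierng99/JointFogComputing | autoscaler/resource_manager.py | update_scale_list2
-- ===== SOURCE A (Python) =====
-- def update_scale_list2(lst_num_request):
--     lst_data = [0, 800, 1100]
--     lst_scale = []
--     for e in lst_num_request:
--         if e < lst_data[1]:
--             lst_scale.append(1)
--         elif e < lst_data[2]:
--             lst_scale.append(2)
--         else:
--             lst_scale.append(3)
--     return lst_scale
-- ===== SOURCE B (Python) =====
-- def update_scale_list2(lst_num_request):
--     thresholds = [800, 1100]
--     return [1 + sum(t <= e for t in thresholds) for e in lst_num_request]
-- ===== Notes on version B (the rewrite author's own statement) =====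
-- stated objective: alternative
-- what changed: Replaces the if/elif threshold cascade building the list by appends with a branch-free arithmetic formulation: each element's scale level is computed as 1 plus the count of thresholds it has reached (a sum of boolean indicators), produced by a comprehension.
import Mathlib
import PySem

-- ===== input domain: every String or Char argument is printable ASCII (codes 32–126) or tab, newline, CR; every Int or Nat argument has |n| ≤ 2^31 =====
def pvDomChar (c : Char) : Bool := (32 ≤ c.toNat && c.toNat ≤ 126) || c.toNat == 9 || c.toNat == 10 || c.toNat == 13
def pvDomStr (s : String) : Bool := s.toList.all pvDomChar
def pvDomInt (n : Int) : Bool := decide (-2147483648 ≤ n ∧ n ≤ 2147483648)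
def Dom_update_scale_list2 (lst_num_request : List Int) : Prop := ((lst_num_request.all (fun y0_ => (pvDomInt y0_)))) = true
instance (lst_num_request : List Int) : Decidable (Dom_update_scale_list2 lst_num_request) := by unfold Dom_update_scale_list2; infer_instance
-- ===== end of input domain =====

-- B replaces A's if/elif cascade by a branch-free count of thresholds reached (alternative decomposition, same cost).


-- ===== PORT A =====
-- transliteration of A: threshold table lst_data, loop appending 1/2/3 by an if/elif cascade
def update_scale_list2 (lst_num_request : List Int) : List Int :=
  let lst_data : List Int := [0, 800, 1100]
  lst_num_request.foldl (fun lst_scale e =>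
    if e < (PySem.List.pyGet? lst_data 1).getD 0 then lst_scale ++ [1]
    else if e < (PySem.List.pyGet? lst_data 2).getD 0 then lst_scale ++ [2]
    else lst_scale ++ [3]) []

-- ===== PORT B =====
-- transliteration of B: comprehension, scale = 1 + sum of boolean indicators (t <= e) over the thresholds
def update_scale_list2_alt (lst_num_request : List Int) : List Int :=
  let thresholds : List Int := [800, 1100]
  lst_num_request.map (fun e =>
    1 + thresholds.foldl (fun s t => s + (if t ≤ e then 1 else 0)) 0)

-- ===== PRECONDITION & SPEC =====
def Spec_update_scale_list2 (lst_num_request : List Int) (out : List Int) : Prop := out = update_scale_list2_alt lst_num_request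
instance (lst_num_request : List Int) (out : List Int) : Decidable (Spec_update_scale_list2 lst_num_request out) := by unfold Spec_update_scale_list2; infer_instance

-- ===== CLAIM (what is proved, stated in full; the proofs are below) =====
def Claim_equal_update_scale_list2 : Prop := ∀ (lst_num_request : List Int), Dom_update_scale_list2 lst_num_request → Spec_update_scale_list2 lst_num_request (update_scale_list2 lst_num_request)

-- ===== LEMMAS AND PROOFS =====
-- ===== VERDICT (by name: the statement is the Claim_ definition above) =====
theorem update_scale_list2_spec : Claim_equal_update_scale_list2 := by
  intro l hdom
  clear hdom
  unfold Spec_update_scale_list2 update_scale_list2 update_scale_list2_alt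
  simp only [PySem.List.pyGet?]
  have : ∀ (acc : List Int),
      l.foldl (fun lst_scale e =>
        if e < 800 then lst_scale ++ [1]
        else if e < 1100 then lst_scale ++ [2] else lst_scale ++ [3]) acc
        = acc ++ l.map (fun e =>
            1 + (([800, 1100] : List Int).foldl (fun s t => s + (if t ≤ e then 1 else 0)) 0)) := by
    induction l with
    | nil => simp
    | cons x xs ih =>
      intro acc
      simp only [List.foldl_cons, List.map_cons]
      rw [ih]
      by_cases h1 : x < 800 <;> by_cases h2 : x < 1100 <;>
        simp [h1, h2] <;> split_ifs <;> omega
  simpa using this []
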